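-- pv_equiv track=rewrite | github.com/benjaminwzh/SR-interrater-agreement | CheckingService.py | findAgreement
-- ===== SOURCE A (Python) =====
-- def findAgreement(r1data, r2data):
--     agreed, r1only, r2only = [], r1data, []
--     # Check whether title is defined in both data, or only one
--     for title in r2data:
--         if title in r1only:
--             agreed.append(title)
--             r1only.remove(title)
--         else:
--             r2only.append(title)
--     # Each list has a count of titles, followed by the titles
--     final = [agreed, r1only, r2only]
--     for lst in final:
--         count = f"{str(len(lst))} article(s)"
--         lst.insert(0, count)
--     return final
-- ===== SOURCE B (Python) =====
-- def _header(lst):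
--     return [str(len(lst)) + " article(s)"] + lst
--
-- def findAgreement(r1data, r2data):
--     # count occurrences of each title in r1
--     counts = {}
--     for t in r1data:
--         counts[t] = counts.get(t, 0) + 1
--     agreed, r2only = [], []
--     for t in r2data:
--         if counts.get(t, 0) > 0:
--             agreed.append(t)
--             counts[t] = counts.get(t, 0) - 1
--         else:
--             r2only.append(t)
--     # r1only = r1data with the first count(agreed, t) occurrences of each t skipped
--     removed = {}
--     for t in agreed:
--         removed[t] = removed.get(t, 0) + 1
--     r1only = []
--     for t in r1data:
--         if removed.get(t, 0) > 0:
--             removed[t] = removed.get(t, 0) - 1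
--         else:
--             r1only.append(t)
--     return [_header(agreed), _header(r1only), _header(r2only)]
-- ===== Notes on version B (the rewrite author's own statement) =====
-- stated objective: faster
-- what changed: Replaces the per-title linear membership test and list.remove on a shrinking copy of r1 with two dict-count passes: one counter of r1 titles drives the r2 scan, and r1only is rebuilt in one pass skipping the first matched occurrences.
import Mathlib
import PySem

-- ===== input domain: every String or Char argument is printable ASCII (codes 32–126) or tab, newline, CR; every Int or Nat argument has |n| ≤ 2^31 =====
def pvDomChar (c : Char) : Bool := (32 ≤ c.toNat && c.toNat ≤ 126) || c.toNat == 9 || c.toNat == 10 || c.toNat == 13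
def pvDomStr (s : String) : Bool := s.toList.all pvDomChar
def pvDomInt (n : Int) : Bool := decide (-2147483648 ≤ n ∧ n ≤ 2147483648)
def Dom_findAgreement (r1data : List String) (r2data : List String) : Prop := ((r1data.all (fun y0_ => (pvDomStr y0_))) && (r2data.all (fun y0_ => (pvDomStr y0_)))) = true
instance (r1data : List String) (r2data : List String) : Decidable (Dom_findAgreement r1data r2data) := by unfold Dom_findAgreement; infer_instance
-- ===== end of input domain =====

-- B replaces A's O(n*m) membership/remove scan with dict-count passes (O(n+m)); equal return value.
-- Note: Python A mutates r1data in place (r1only aliases it); B does not — the claim is about the return value only.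


-- ===== PORT A =====
-- remove? is applied only under the membership guard, where Python's list.remove succeeds; getD is never the fallback there
def findAgreement (r1data : List String) (r2data : List String) : List (List String) :=
  let s := r2data.foldl (fun (st : List String × List String × List String) title =>
    if st.2.1.contains title then
      (st.1 ++ [title], (PySem.List.remove? st.2.1 title).getD st.2.1, st.2.2)
    else
      (st.1, st.2.1, st.2.2 ++ [title])) ([], r1data, [])
  let final := [s.1, s.2.1, s.2.2]
  final.map (fun lst => PySem.List.insert lst 0 (PySem.Int.toStr (lst.length : Int) ++ " article(s)"))

-- ===== PORT B =====
def findAgreementHeader (lst : List String) : List String :=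
  (PySem.Int.toStr (lst.length : Int) ++ " article(s)") :: lst

def findAgreement_alt (r1data : List String) (r2data : List String) : List (List String) :=
  let counts := r1data.foldl (fun (d : PySem.Dict String Int) t => d.modify t 0 (· + 1)) PySem.Dict.empty
  let s := r2data.foldl (fun (st : PySem.Dict String Int × List String × List String) t =>
    if 0 < st.1.getD t 0 then (st.1.modify t 0 (· - 1), st.2.1 ++ [t], st.2.2)
    else (st.1, st.2.1, st.2.2 ++ [t])) (counts, [], [])
  let removed := s.2.1.foldl (fun (d : PySem.Dict String Int) t => d.modify t 0 (· + 1)) PySem.Dict.empty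
  let r1only := (r1data.foldl (fun (st : PySem.Dict String Int × List String) t =>
    if 0 < st.1.getD t 0 then (st.1.modify t 0 (· - 1), st.2)
    else (st.1, st.2 ++ [t])) (removed, [])).2
  [findAgreementHeader s.2.1, findAgreementHeader r1only, findAgreementHeader s.2.2]

-- ===== PRECONDITION & SPEC =====
def Spec_findAgreement (r1data : List String) (r2data : List String) (out : List (List String)) : Prop := out = findAgreement_alt r1data r2data
instance (r1data : List String) (r2data : List String) (out : List (List String)) : Decidable (Spec_findAgreement r1data r2data out) := by unfold Spec_findAgreement; infer_instance

-- ===== CLAIM (what is proved, stated in full; the proofs are below) =====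
def Claim_equal_findAgreement : Prop := ∀ (r1data : List String) (r2data : List String), Dom_findAgreement r1data r2data → Spec_findAgreement r1data r2data (findAgreement r1data r2data)

-- ===== LEMMAS AND PROOFS =====

-- skipF l f drops, for each title t, the first (f t) occurrences of t from l
def skipF : List String → (String → Nat) → List String
  | [], _ => []
  | x :: xs, f => if 0 < f x then skipF xs (fun y => if y = x then f x - 1 else f y) else x :: skipF xs (f)

theorem skipF_congr (l : List String) (f g : String → Nat) (h : ∀ y, f y = g y) : skipF l f = skipF l g := by
  induction l generalizing f g with
  | nil => rfl
  | cons x xs ih =>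
    simp only [skipF, h]
    split
    · exact ih _ _ (fun y => by by_cases hy : y = x <;> simp [hy, h]) 
    · exact congrArg _ (ih _ _ h)

theorem skipF_zero (l : List String) : skipF l (fun _ => 0) = l := by
  induction l with
  | nil => rfl
  | cons x xs ih => simp [skipF, ih]

theorem mem_skipF (l : List String) (f : String → Nat) (a : String) :
    a ∈ skipF l f ↔ f a < l.count a := by
  induction l generalizing f with
  | nil => simp [skipF]
  | cons x xs ih =>
    by_cases hx : 0 < f x
    · simp only [skipF, if_pos hx, ih]
      by_cases ha : a = x
      · subst ha; simp [List.count_cons]; omega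
      · simp [ha, List.count_cons, Ne.symm ha]
    · simp only [skipF, if_neg hx, List.mem_cons, ih]
      by_cases ha : a = x
      · subst ha; simp [List.count_cons]; omega
      · simp [ha, List.count_cons, Ne.symm ha]

theorem erase_skipF (l : List String) (f : String → Nat) (a : String) (h : f a < l.count a) :
    (skipF l f).erase a = skipF l (fun y => if y = a then f y + 1 else f y) := by
  induction l generalizing f with
  | nil => simp [List.count_nil] at h
  | cons x xs ih =>
    by_cases hx : 0 < f x
    · rw [skipF, if_pos hx]
      have hx' : (0 : Nat) < (if x = a then f x + 1 else f x) := by split <;> omega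
      rw [skipF, if_pos hx']
      by_cases ha : a = x
      · subst ha
        have hcnt : (fun y => if y = a then f a - 1 else f y) a < xs.count a := by
          simp [List.count_cons] at h ⊢; omega
        rw [ih _ hcnt]
        apply skipF_congr
        intro y; by_cases hy : y = a <;> simp [hy] <;> omega
      · have hcnt : (fun y => if y = x then f x - 1 else f y) a < xs.count a := by
          simp [ha, List.count_cons, Ne.symm ha] at h ⊢; omega
        rw [ih _ hcnt]
        apply skipF_congr
        intro y; by_cases hy : y = x <;> by_cases hy' : y = a <;>
          simp_all
    · rw [skipF, if_neg hx]
      by_cases ha : a = x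
      · subst ha
        have hx' : (0 : Nat) < (if a = a then f a + 1 else f a) := by simp
        rw [skipF, if_pos hx', List.erase_cons_head]
        exact (skipF_congr _ _ _ (fun y => by by_cases hy : y = a <;> simp [hy] <;> omega)).symm
      · have hx' : ¬ (0 : Nat) < (if x = a then f x + 1 else f x) := by
          simp [Ne.symm ha]; omega
        rw [skipF, if_neg hx', List.erase_cons_tail (by simp [Ne.symm ha])]
        have hcnt : f a < xs.count a := by
          simp [List.count_cons, Ne.symm ha] at h; omega
        rw [ih _ hcnt]

-- main loop invariant (phase 1)
theorem loop1_eq (r1 : List String) (r2 : List String) :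
    ∀ (ag r2o : List String) (f : String → Nat) (d : PySem.Dict String Int),
    (∀ t, d.getD t 0 = (r1.count t : Int) - f t) →
    (∀ t, f t ≤ r1.count t) →
    (∀ t, ag.count t = f t) →
    (r2.foldl (fun (st : List String × List String × List String) title =>
        if st.2.1.contains title then
          (st.1 ++ [title], (PySem.List.remove? st.2.1 title).getD st.2.1, st.2.2)
        else
          (st.1, st.2.1, st.2.2 ++ [title])) (ag, skipF r1 f, r2o)
      = (let b := r2.foldl (fun (st : PySem.Dict String Int × List String × List String) t =>
            if 0 < st.1.getD t 0 then (st.1.modify t 0 (· - 1), st.2.1 ++ [t], st.2.2)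
            else (st.1, st.2.1, st.2.2 ++ [t])) (d, ag, r2o)
         (b.2.1, skipF r1 (fun t => (b.2.1).count t), b.2.2))) := by
  induction r2 with
  | nil =>
    intro ag r2o f d h1 h2 h3
    simp only [List.foldl_nil]
    exact Prod.ext rfl (Prod.ext (skipF_congr _ _ _ (fun t => (h3 t).symm)) rfl)
  | cons t rest ih =>
    intro ag r2o f d h1 h2 h3
    simp only [List.foldl_cons]
    by_cases hc : f t < r1.count t
    · have hmem : t ∈ skipF r1 f := (mem_skipF r1 f t).2 hc
      have hA : (skipF r1 f).contains t = true := by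
        simpa [List.contains_iff_mem] using hmem
      have hB : 0 < d.getD t 0 := by rw [h1]; omega
      rw [if_pos hA, if_pos hB]
      have hrem : (PySem.List.remove? (skipF r1 f) t).getD (skipF r1 f)
          = skipF r1 (fun y => if y = t then f y + 1 else f y) := by
        rw [PySem.List.remove?_eq_some_erase _ t hmem, Option.getD_some, erase_skipF _ _ _ hc]
      rw [hrem]
      apply ih
      · intro s
        rw [PySem.Dict.getD_modify, h1]
        by_cases hs : s = t <;> simp [hs, h1] <;> push_cast <;> omega
      · intro s; by_cases hs : s = t <;> simp [hs] <;> [omega; exact h2 s]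
      · intro s
        rw [List.count_append]
        by_cases hs : s = t
        · simp [hs, h3, List.count_cons]
        · simp [hs, h3, List.count_cons, Ne.symm hs]
    · have hmem : t ∉ skipF r1 f := fun h => hc ((mem_skipF r1 f t).1 h)
      have hA : (skipF r1 f).contains t = false := by
        simpa [List.contains_iff_mem] using hmem
      have hB : ¬ 0 < d.getD t 0 := by rw [h1]; omega
      rw [hA, if_neg hB]
      simp only [Bool.false_eq_true, if_false]
      exact ih ag (r2o ++ [t]) f d h1 h2 h3

-- phase 2: the dict-skipping loop computes skipF
theorem loop2_eq (l : List String) :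
    ∀ (d : PySem.Dict String Int) (acc : List String),
    (l.foldl (fun (st : PySem.Dict String Int × List String) t =>
        if 0 < st.1.getD t 0 then (st.1.modify t 0 (· - 1), st.2)
        else (st.1, st.2 ++ [t])) (d, acc)).2
      = acc ++ skipF l (fun t => (d.getD t 0).toNat) := by
  induction l with
  | nil => intro d acc; simp [skipF]
  | cons x xs ih =>
    intro d acc
    by_cases hx : 0 < d.getD x 0
    · have hx' : 0 < (d.getD x 0).toNat := by omega
      rw [List.foldl_cons, if_pos hx, ih, skipF, if_pos hx']
      congr 1
      apply skipF_congr
      intro y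
      rw [PySem.Dict.getD_modify]
      by_cases hy : y = x <;> simp [hy] <;> omega
    · have hx' : ¬ 0 < (d.getD x 0).toNat := by omega
      rw [List.foldl_cons, if_neg hx, ih, skipF, if_neg hx']
      simp

-- ===== VERDICT (by name: the statement is the Claim_ definition above) =====
theorem findAgreement_spec : Claim_equal_findAgreement := by
  intro r1 r2 _
  show findAgreement r1 r2 = findAgreement_alt r1 r2
  have hcnt : ∀ l : List String, (l.foldl (fun (d : PySem.Dict String Int) t => d.modify t 0 (· + 1)) PySem.Dict.empty) = PySem.Dict.counter l := by
    intro l; rw [PySem.Dict.counter_eq_foldl]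
  have h1 := loop1_eq r1 r2 [] [] (fun _ => 0) (PySem.Dict.counter r1)
      (fun t => by simp [PySem.Dict.getD_counter]) (fun t => Nat.zero_le _) (fun t => rfl)
  rw [skipF_zero] at h1
  have h2 : ∀ ag : List String, skipF r1 (fun t => ((PySem.Dict.counter ag).getD t 0).toNat) = skipF r1 (fun t => ag.count t) :=
    fun ag => skipF_congr _ _ _ (fun t => by simp [PySem.Dict.getD_counter])
  simp only [findAgreement, findAgreement_alt, hcnt, h1, loop2_eq, h2,
    findAgreementHeader, List.map, List.nil_append]
  have hins : ∀ (l : List String) (x : String), PySem.List.insert l 0 x = x :: l := by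
    intro l x; simp [PySem.List.insert, PySem.List.sliceIndices]
  simp [hins]
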